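-- pv_equiv track=rewrite | github.com/alexander-nemirovskiy/s2r_mapping_ui | app/core/mapping_gen/StructuralMapping.py | getIndexForMatchedPairs
-- ===== SOURCE A (Python) =====
-- def getIndexForMatchedPairs(matchedRangesPair, rangesIndexes):
--   indexlist = []
--   for range in matchedRangesPair:
--    for cl in rangesIndexes:
--     if (range[0]== cl[0] and range[1]== cl[3]):
--      index = [cl[1], cl[4], cl[2], range[2]]
--      indexlist.append(index)
--   return indexlist
-- ===== SOURCE B (Python) =====
-- def getIndexForMatchedPairs(matchedRangesPair, rangesIndexes):
--     # Hash join: bucket rangesIndexes by cl[0] once, then each range scans only its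
--     # own bucket (checking cl[3]) instead of rescanning all of rangesIndexes.
--     if not matchedRangesPair or not rangesIndexes:
--         return []
--     buckets = {}
--     for cl in rangesIndexes:
--         buckets.setdefault(cl[0], []).append(cl)
--     indexlist = []
--     for r in matchedRangesPair:
--         for cl in buckets.get(r[0], []):
--             if r[1] == cl[3]:
--                 indexlist.append([cl[1], cl[4], cl[2], r[2]])
--     return indexlist
-- ===== Notes on version B (the rewrite author's own statement) =====
-- stated objective: alternative
-- what changed: Replaces A's nested rescan of rangesIndexes per range with a hash join: buckets rangesIndexes once by cl[0] (insertion order preserved), then each range scans only its own bucket; empty inputs return [] immediately.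
import Mathlib
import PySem

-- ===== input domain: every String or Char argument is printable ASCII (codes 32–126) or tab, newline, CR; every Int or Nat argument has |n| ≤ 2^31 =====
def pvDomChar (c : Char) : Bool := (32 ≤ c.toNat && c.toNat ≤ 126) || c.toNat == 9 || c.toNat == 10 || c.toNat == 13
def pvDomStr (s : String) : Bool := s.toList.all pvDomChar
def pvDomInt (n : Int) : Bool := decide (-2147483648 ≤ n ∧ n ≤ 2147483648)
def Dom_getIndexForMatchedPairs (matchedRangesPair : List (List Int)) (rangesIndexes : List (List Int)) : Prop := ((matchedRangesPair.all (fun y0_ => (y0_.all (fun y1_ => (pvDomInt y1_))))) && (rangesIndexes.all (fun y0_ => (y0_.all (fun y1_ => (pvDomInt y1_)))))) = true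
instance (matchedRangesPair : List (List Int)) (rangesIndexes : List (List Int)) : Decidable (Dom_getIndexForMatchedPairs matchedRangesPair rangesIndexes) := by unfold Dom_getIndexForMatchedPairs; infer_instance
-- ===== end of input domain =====

-- B replaces A's inner rescan of all of rangesIndexes with a hash join: a dict of buckets
-- keyed by cl[0] built once, then each range scans only its own bucket (alternative algorithm, same result).

-- ===== PORT A =====
-- list indexing is read with List.getD; Pre_ guarantees every index Python actually reads is in range
def getIndexForMatchedPairs (matchedRangesPair : List (List Int)) (rangesIndexes : List (List Int)) : List (List Int) :=
  matchedRangesPair.foldl (fun indexlist r =>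
    rangesIndexes.foldl (fun indexlist cl =>
      if r.getD 0 0 = cl.getD 0 0 ∧ r.getD 1 0 = cl.getD 3 0 then
        indexlist ++ [[cl.getD 1 0, cl.getD 4 0, cl.getD 2 0, r.getD 2 0]]
      else indexlist) indexlist) []

-- ===== PORT B =====
def getIndexForMatchedPairs_alt (matchedRangesPair : List (List Int)) (rangesIndexes : List (List Int)) : List (List Int) :=
  if matchedRangesPair = [] ∨ rangesIndexes = [] then []
  else
    -- buckets.setdefault(cl[0], []).append(cl)  ≡  modify with default []
    let buckets : PySem.Dict Int (List (List Int)) :=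
      rangesIndexes.foldl (fun d cl => d.modify (cl.getD 0 0) [] (· ++ [cl])) PySem.Dict.empty
    matchedRangesPair.foldl (fun indexlist r =>
      (buckets.getD (r.getD 0 0) []).foldl (fun indexlist cl =>
        if r.getD 1 0 = cl.getD 3 0 then
          indexlist ++ [[cl.getD 1 0, cl.getD 4 0, cl.getD 2 0, r.getD 2 0]]
        else indexlist) indexlist) []

-- ===== PRECONDITION & SPEC =====
-- the accesses Python A performs on the pair (r, cl) all stay in range (mirrors A's short-circuit)
def pvPairOK (r cl : List Int) : Bool :=
  decide (1 ≤ r.length) && decide (1 ≤ cl.length) &&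
  (!(decide (r.getD 0 0 = cl.getD 0 0)) ||
    (decide (2 ≤ r.length) && decide (4 ≤ cl.length) &&
      (!(decide (r.getD 1 0 = cl.getD 3 0)) ||
        (decide (3 ≤ r.length) && decide (5 ≤ cl.length)))))

-- Pre_ is exactly the set of inputs where Python A returns (no IndexError): every index
-- A's short-circuit evaluation actually reads exists; nothing A returns on is excluded.
def Pre_getIndexForMatchedPairs (matchedRangesPair : List (List Int)) (rangesIndexes : List (List Int)) : Prop :=
  (matchedRangesPair.isEmpty || rangesIndexes.isEmpty ||
    matchedRangesPair.all (fun r => rangesIndexes.all (fun cl => pvPairOK r cl))) = true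
instance (matchedRangesPair : List (List Int)) (rangesIndexes : List (List Int)) : Decidable (Pre_getIndexForMatchedPairs matchedRangesPair rangesIndexes) := by unfold Pre_getIndexForMatchedPairs; infer_instance

def pvWitness_getIndexForMatchedPairs : List (List Int) × List (List Int) :=
  ([[1, 2, 7]], [[1, 10, 11, 2, 12], [3, 0, 0, 4, 0]])

def Spec_getIndexForMatchedPairs (matchedRangesPair : List (List Int)) (rangesIndexes : List (List Int)) (out : List (List Int)) : Prop := out = getIndexForMatchedPairs_alt matchedRangesPair rangesIndexes
instance (matchedRangesPair : List (List Int)) (rangesIndexes : List (List Int)) (out : List (List Int)) : Decidable (Spec_getIndexForMatchedPairs matchedRangesPair rangesIndexes out) := by unfold Spec_getIndexForMatchedPairs; infer_instance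

-- ===== CLAIM (what is proved, stated in full; the proofs are below) =====
def Claim_equal_getIndexForMatchedPairs : Prop := ∀ (matchedRangesPair : List (List Int)) (rangesIndexes : List (List Int)), Dom_getIndexForMatchedPairs matchedRangesPair rangesIndexes → Pre_getIndexForMatchedPairs matchedRangesPair rangesIndexes → Spec_getIndexForMatchedPairs matchedRangesPair rangesIndexes (getIndexForMatchedPairs matchedRangesPair rangesIndexes)

-- ===== LEMMAS AND PROOFS =====

-- the bucket dict looked up at key k holds exactly the rows whose first entry is k, in order
lemma getD_buckets (ri : List (List Int)) (d : PySem.Dict Int (List (List Int))) (k : Int) :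
    (ri.foldl (fun d cl => d.modify (cl.getD 0 0) [] (· ++ [cl])) d).getD k []
      = d.getD k [] ++ ri.filter (fun cl => cl.getD 0 0 == k) := by
  induction ri generalizing d with
  | nil => simp
  | cons c tl ih =>
    simp only [List.foldl_cons, List.filter_cons]
    rw [ih, PySem.Dict.getD_modify]
    by_cases h : c.getD 0 0 = k
    · subst h; simp
    · have hb : ¬((c.getD 0 0 == k) = true) := by simpa [beq_iff_eq] using h
      rw [if_neg (fun hh => h hh.symm), if_neg hb]

-- A's inner scan collects the matching rows of ri, in order
lemma inner_A (r : List Int) (ri : List (List Int)) (acc : List (List Int)) :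
    ri.foldl (fun indexlist cl =>
      if r.getD 0 0 = cl.getD 0 0 ∧ r.getD 1 0 = cl.getD 3 0 then
        indexlist ++ [[cl.getD 1 0, cl.getD 4 0, cl.getD 2 0, r.getD 2 0]]
      else indexlist) acc
    = acc ++ ((ri.filter (fun cl => cl.getD 0 0 == r.getD 0 0)).filter
        (fun cl => decide (r.getD 1 0 = cl.getD 3 0))).map
        (fun cl => [cl.getD 1 0, cl.getD 4 0, cl.getD 2 0, r.getD 2 0]) := by
  rw [PySem.List.foldl_append_ite, List.filter_filter]
  congr 2
  apply List.filter_congr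
  intro cl _
  rw [Bool.eq_iff_iff]
  simp only [decide_eq_true_eq, Bool.and_eq_true, beq_iff_eq]
  constructor
  · rintro ⟨h1, h2⟩; exact ⟨h2, h1.symm⟩
  · rintro ⟨h1, h2⟩; exact ⟨h2.symm, h1⟩

-- A on an empty rangesIndexes returns []
lemma A_nil_ri (m : List (List Int)) :
    getIndexForMatchedPairs m [] = [] := by
  unfold getIndexForMatchedPairs
  induction m with
  | nil => rfl
  | cons r tl ih => simp only [List.foldl_cons, List.foldl_nil] at ih ⊢; exact ih

theorem getIndexForMatchedPairs_spec : Claim_equal_getIndexForMatchedPairs := by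
  intro m ri _ _
  unfold Spec_getIndexForMatchedPairs getIndexForMatchedPairs_alt
  by_cases hm : m = [] ∨ ri = []
  · rw [if_pos hm]
    rcases hm with hm | hm
    · subst hm; rfl
    · subst hm; exact A_nil_ri m
  · rw [if_neg hm]
    unfold getIndexForMatchedPairs
    apply PySem.List.foldl_congr_mem
    intro acc r _
    rw [inner_A, getD_buckets, PySem.Dict.getD_empty, List.nil_append,
        PySem.List.foldl_append_ite]
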